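-- pv_equiv track=rewrite | github.com/Krandheer/data-structure | get_safest_home.py | safest_home_from_wind_from_left_right
-- ===== SOURCE A (Python) =====
-- def safest_home_from_wind_from_left_right(home_list):
--     """
--     param home_list:
--     return: safe from left, safe from right, house to choose from
--     """
--     safe_from_left = []
--     safe_from_right = []
--     max_left = home_list[0]
--     for index, value in enumerate(home_list):
--         if index == 0:
--             continue
--         else:
--             if value <= max_left:
--                 safe_from_left.append(index)
--             else:
--                 max_left = value
--     max_right = home_list[-1]
--     for i in range(len(home_list) - 2, -1, -1):
--         if home_list[i] <= max_right:
--             safe_from_right.append(i)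
--         else:
--             max_right = home_list[i]
--     temp = []
--     for i in safe_from_right:
--         if i in safe_from_left:
--             temp.append(i)
--     result = [len(safe_from_left), len(safe_from_right), len(temp)]
--
--     return result
-- ===== SOURCE B (Python) =====
-- def safest_home_from_wind_from_left_right(home_list):
--     n = len(home_list)
--     prefix = []
--     m = None
--     for v in home_list:
--         m = v if m is None else max(m, v)
--         prefix.append(m)
--     suf = []
--     m = None
--     for v in reversed(home_list):
--         m = v if m is None else max(m, v)
--         suf.append(m)
--     suffix = suf[::-1]
--     left = right = both = 0
--     for i in range(n):
--         ls = i >= 1 and home_list[i] <= prefix[i - 1]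
--         rs = i <= n - 2 and home_list[i] <= suffix[i + 1]
--         if ls:
--             left += 1
--         if rs:
--             right += 1
--         if ls and rs:
--             both += 1
--     return [left, right, both]
-- ===== Notes on version B (the rewrite author's own statement) =====
-- stated objective: faster
-- what changed: B precomputes prefix-max and suffix-max tables and counts left/right/both-safe indices in one combined pass, replacing A's two index-list builders and the quadratic nested membership-intersection loop.
import Mathlib
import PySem

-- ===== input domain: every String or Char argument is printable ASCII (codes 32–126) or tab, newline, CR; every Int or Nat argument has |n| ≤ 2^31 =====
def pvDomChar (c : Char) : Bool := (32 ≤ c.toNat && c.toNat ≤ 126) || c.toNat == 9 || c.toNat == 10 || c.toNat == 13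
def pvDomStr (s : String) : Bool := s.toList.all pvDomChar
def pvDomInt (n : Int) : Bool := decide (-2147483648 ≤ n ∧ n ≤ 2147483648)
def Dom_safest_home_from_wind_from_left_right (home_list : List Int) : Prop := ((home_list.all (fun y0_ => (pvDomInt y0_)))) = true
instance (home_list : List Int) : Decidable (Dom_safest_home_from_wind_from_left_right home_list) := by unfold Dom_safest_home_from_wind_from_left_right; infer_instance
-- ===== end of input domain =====

-- B replaces A's two index-list builders and quadratic nested intersection scan by prefix/suffix max
-- tables plus one combined counting pass (objective: faster, O(n^2) -> O(n); equal on nonempty lists, where A returns).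


-- ===== PORT A =====
def safest_home_from_wind_from_left_right (home_list : List Int) : List Int :=
  match home_list with
  | [] => []  -- Python raises IndexError on home_list[0]; excluded by Pre_
  | h0 :: _ =>
    let s1 := (PySem.List.enumerate home_list 0).foldl
      (fun (st : List Int × Int) p =>
        if p.1 = 0 then st
        else if p.2 ≤ st.2 then (st.1 ++ [p.1], st.2) else (st.1, p.2))
      ([], h0)
    let safe_from_left := s1.1
    let hn := (home_list.getLast?).getD 0   -- home_list[-1]; list nonempty here, exact
    let s2 := (PySem.List.pyRange ((home_list.length : Int) - 2) (-1) (-1)).foldl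
      (fun (st : List Int × Int) i =>
        let v := PySem.List.pyGetD home_list i 0  -- index always in range here, exact
        if v ≤ st.2 then (st.1 ++ [i], st.2) else (st.1, v))
      ([], hn)
    let safe_from_right := s2.1
    let temp := safe_from_right.foldl
      (fun acc i => if i ∈ safe_from_left then acc ++ [i] else acc) []
    [(safe_from_left.length : Int), (safe_from_right.length : Int), (temp.length : Int)]

-- ===== PORT B =====
def safest_home_from_wind_from_left_right_alt (home_list : List Int) : List Int :=
  let n := home_list.length
  let prefixL := (home_list.foldl
    (fun (st : List Int × Option Int) v =>
      let m := match st.2 with | none => v | some m0 => max m0 v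
      (st.1 ++ [m], some m)) ([], none)).1
  let suf := (home_list.reverse.foldl
    (fun (st : List Int × Option Int) v =>
      let m := match st.2 with | none => v | some m0 => max m0 v
      (st.1 ++ [m], some m)) ([], none)).1
  let suffixL := suf.reverse
  let c := (List.range n).foldl
    (fun (c : Int × Int × Int) i =>
      let ls := decide (1 ≤ i) && decide (home_list.getD i 0 ≤ prefixL.getD (i - 1) 0)
      let rs := decide (i + 1 < n) && decide (home_list.getD i 0 ≤ suffixL.getD (i + 1) 0)
      (c.1 + (if ls then 1 else 0),
       c.2.1 + (if rs then 1 else 0),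
       c.2.2 + (if ls && rs then 1 else 0)))
    (0, 0, 0)
  [c.1, c.2.1, c.2.2]

-- ===== PRECONDITION & SPEC =====
-- Pre_ excludes only the empty list, on which A raises IndexError.
def Pre_safest_home_from_wind_from_left_right (home_list : List Int) : Prop := home_list ≠ []
instance (home_list : List Int) : Decidable (Pre_safest_home_from_wind_from_left_right home_list) := by unfold Pre_safest_home_from_wind_from_left_right; infer_instance
def pvWitness_safest_home_from_wind_from_left_right : List Int := [3, 1, 2]

def Spec_safest_home_from_wind_from_left_right (home_list : List Int) (out : List Int) : Prop := out = safest_home_from_wind_from_left_right_alt home_list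
instance (home_list : List Int) (out : List Int) : Decidable (Spec_safest_home_from_wind_from_left_right home_list out) := by unfold Spec_safest_home_from_wind_from_left_right; infer_instance

-- ===== CLAIM (what is proved, stated in full; the proofs are below) =====
def Claim_equal_safest_home_from_wind_from_left_right : Prop := ∀ (home_list : List Int), Dom_safest_home_from_wind_from_left_right home_list → Pre_safest_home_from_wind_from_left_right home_list → Spec_safest_home_from_wind_from_left_right home_list (safest_home_from_wind_from_left_right home_list)

-- ===== LEMMAS AND PROOFS =====

def pvRunMax (m : Int) : List Int → List Int
  | [] => []
  | v :: t => max m v :: pvRunMax (max m v) t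

def pvPref : List Int → List Int
  | [] => []
  | h :: t => h :: pvRunMax h t

def pvPL (a : List Int) (i : ℕ) : Bool :=
  decide (1 ≤ i) && decide (a.getD i 0 ≤ (pvPref a).getD (i - 1) 0)

def pvQR (a : List Int) (i : ℕ) : Bool :=
  decide (i + 1 < a.length) && decide (a.getD i 0 ≤ ((pvPref a.reverse).reverse).getD (i + 1) 0)

theorem length_pvRunMax (m : Int) (t : List Int) : (pvRunMax m t).length = t.length := by
  induction t generalizing m with
  | nil => rfl
  | cons v t ih => simp [pvRunMax, ih]

theorem length_pvPref (a : List Int) : (pvPref a).length = a.length := by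
  cases a with
  | nil => rfl
  | cons h t => simp [pvPref, length_pvRunMax]

theorem bfold (t : List Int) : ∀ (acc : List Int) (m : Int),
    t.foldl (fun (st : List Int × Option Int) v =>
      ((st.1 ++ [match st.2 with | none => v | some m0 => max m0 v]),
       some (match st.2 with | none => v | some m0 => max m0 v))) (acc, some m)
    = (acc ++ pvRunMax m t, some (t.foldl max m)) := by
  induction t with
  | nil => simp [pvRunMax]
  | cons v t ih => intro acc m; simp [pvRunMax, ih]

theorem bpref (a : List Int) :
    (a.foldl (fun (st : List Int × Option Int) v =>
      ((st.1 ++ [match st.2 with | none => v | some m0 => max m0 v]),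
       some (match st.2 with | none => v | some m0 => max m0 v))) ([], none)).1 = pvPref a := by
  cases a with
  | nil => rfl
  | cons h t => simp [List.foldl_cons, bfold, pvPref]

theorem count3 (p q : ℕ → Bool) (l : List ℕ) : ∀ (x y z : Int),
    l.foldl (fun (c : Int × Int × Int) i =>
      (c.1 + (if p i then 1 else 0), c.2.1 + (if q i then 1 else 0),
       c.2.2 + (if p i && q i then 1 else 0))) (x, y, z)
    = (x + l.countP p, y + l.countP q, z + l.countP (fun i => p i && q i)) := by
  induction l with
  | nil => simp
  | cons i l ih =>
    intro x y z
    rw [List.foldl_cons, ih]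
    simp [List.countP_cons]
    refine ⟨?_, ?_, ?_⟩ <;> split_ifs <;> simp_all <;> ring



theorem aleft_fold (t : List Int) : ∀ (s m : Int) (acc : List Int), 1 ≤ s →
    ((PySem.List.enumerate t s).foldl
      (fun (st : List Int × Int) p =>
        if p.1 = 0 then st
        else if p.2 ≤ st.2 then (st.1 ++ [p.1], st.2) else (st.1, p.2)) (acc, m)).1
    = acc ++ ((List.range t.length).filter
        (fun j => decide (t.getD j 0 ≤ (m :: pvRunMax m t).getD j 0))).map
        (fun (j : ℕ) => s + (j : Int)) := by
  induction t with
  | nil => intro s m acc _; simp [PySem.List.enumerate_nil]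
  | cons v t ih =>
    intro s m acc hs
    rw [PySem.List.enumerate_cons, List.foldl_cons]
    have hs0 : ¬ (s = 0) := by omega
    simp only [hs0, if_false]
    rw [List.length_cons, List.range_succ_eq_map, List.filter_cons]
    simp only [List.getD_cons_zero]
    rw [List.filter_map]
    by_cases hv : v ≤ m
    · have hmax : max m v = m := by omega
      simp only [hv, decide_true, if_true]
      rw [ih (s+1) m (acc ++ [s]) (by omega)]
      rw [List.map_cons, List.map_map, List.append_assoc, List.singleton_append]
      have hB : List.filter ((fun j => decide ((v :: t).getD j 0 ≤ (m :: pvRunMax m (v :: t)).getD j 0)) ∘ Nat.succ) (List.range t.length)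
          = List.filter (fun j => decide (t.getD j 0 ≤ (m :: pvRunMax m t).getD j 0)) (List.range t.length) := by
        apply List.filter_congr; intro j _
        simp only [Function.comp, List.getD_cons_succ, pvRunMax, hmax]
      rw [hB]
      have hf : ∀ l : List ℕ, l.map ((fun j : ℕ => s + (j : Int)) ∘ Nat.succ) = l.map (fun j : ℕ => s + 1 + (j : Int)) := by
        intro l; apply List.map_congr_left; intro j _; simp only [Function.comp]; push_cast; ring
      rw [hf]
      norm_num
    · have hmax : max m v = v := by omega
      simp only [hv, decide_false, Bool.false_eq_true, if_false]
      rw [ih (s+1) v acc (by omega), List.map_map]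
      have hB : List.filter ((fun j => decide ((v :: t).getD j 0 ≤ (m :: pvRunMax m (v :: t)).getD j 0)) ∘ Nat.succ) (List.range t.length)
          = List.filter (fun j => decide (t.getD j 0 ≤ (v :: pvRunMax v t).getD j 0)) (List.range t.length) := by
        apply List.filter_congr; intro j _
        simp only [Function.comp, List.getD_cons_succ, pvRunMax, hmax]
      rw [hB]
      have hf : ∀ l : List ℕ, l.map ((fun j : ℕ => s + (j : Int)) ∘ Nat.succ) = l.map (fun j : ℕ => s + 1 + (j : Int)) := by
        intro l; apply List.map_congr_left; intro j _; simp only [Function.comp]; push_cast; ring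
      rw [hf]

theorem aright_fold (xs : List Int) : ∀ (k : ℕ), k ≤ xs.length → ∀ (m : Int) (acc : List Int),
    ((PySem.List.pyRange ((k : Int) - 1) (-1) (-1)).foldl
      (fun (st : List Int × Int) i =>
        if PySem.List.pyGetD xs i 0 ≤ st.2 then (st.1 ++ [i], st.2)
        else (st.1, PySem.List.pyGetD xs i 0)) (acc, m)).1
    = acc ++ ((List.range k).filter
        (fun j => decide ((xs.take k).reverse.getD j 0 ≤ (m :: pvRunMax m (xs.take k).reverse).getD j 0))).map
        (fun (j : ℕ) => (k : Int) - 1 - (j : Int)) := by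
  intro k
  induction k with
  | zero => intro _ m acc; rw [PySem.List.pyRange_neg_one_eq_nil (by norm_num)]; simp
  | succ k ih =>
    intro hk m acc
    have hk' : k < xs.length := hk
    have h1 : ((k + 1 : ℕ) : Int) - 1 = (k : Int) := by push_cast; ring
    rw [h1, PySem.List.pyRange_neg_one_cons (by omega), List.foldl_cons]
    have hget : PySem.List.pyGetD xs (k : Int) 0 = xs.getD k 0 := by
      simp [PySem.List.pyGetD_natCast]
    simp only [hget]
    have hw : (xs.take (k+1)).reverse = xs.getD k 0 :: (xs.take k).reverse := by
      have h2 : xs[k]? = some xs[k] := List.getElem?_eq_getElem hk'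
      have hgd : xs.getD k 0 = xs[k] := by rw [List.getD_eq_getElem?_getD, h2]; rfl
      rw [List.take_add_one, h2, hgd]; simp
    rw [hw, List.range_succ_eq_map, List.filter_cons]
    simp only [List.getD_cons_zero]
    rw [List.filter_map]
    by_cases hv : xs.getD k 0 ≤ m
    · have hmax : max m (xs.getD k 0) = m := by omega
      simp only [hv, decide_true, if_true]
      rw [ih (by omega) m (acc ++ [(k : Int)])]
      rw [List.map_cons, List.map_map, List.append_assoc, List.singleton_append]
      have hB : List.filter ((fun j => decide ((xs.getD k 0 :: (xs.take k).reverse).getD j 0 ≤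
            (m :: pvRunMax m (xs.getD k 0 :: (xs.take k).reverse)).getD j 0)) ∘ Nat.succ) (List.range k)
          = List.filter (fun j => decide ((xs.take k).reverse.getD j 0 ≤
            (m :: pvRunMax m (xs.take k).reverse).getD j 0)) (List.range k) := by
        apply List.filter_congr; intro j _
        simp only [Function.comp, List.getD_cons_succ, pvRunMax, hmax]
      rw [hB]
      have hf : ∀ l : List ℕ, l.map ((fun (j : ℕ) => (k : Int) - (j : Int)) ∘ Nat.succ)
          = l.map (fun (j : ℕ) => (k : Int) - 1 - (j : Int)) := by
        intro l; apply List.map_congr_left; intro j _; simp only [Function.comp]; push_cast; ring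
      rw [hf]
      norm_num
    · have hmax : max m (xs.getD k 0) = xs.getD k 0 := by omega
      simp only [hv, decide_false, Bool.false_eq_true, if_false]
      rw [ih (by omega) (xs.getD k 0) acc, List.map_map]
      have hB : List.filter ((fun j => decide ((xs.getD k 0 :: (xs.take k).reverse).getD j 0 ≤
            (m :: pvRunMax m (xs.getD k 0 :: (xs.take k).reverse)).getD j 0)) ∘ Nat.succ) (List.range k)
          = List.filter (fun j => decide ((xs.take k).reverse.getD j 0 ≤
            (xs.getD k 0 :: pvRunMax (xs.getD k 0) (xs.take k).reverse).getD j 0)) (List.range k) := by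
        apply List.filter_congr; intro j _
        simp only [Function.comp, List.getD_cons_succ, pvRunMax, hmax]
      rw [hB]
      have hf : ∀ l : List ℕ, l.map ((fun (j : ℕ) => (k : Int) - (j : Int)) ∘ Nat.succ)
          = l.map (fun (j : ℕ) => (k : Int) - 1 - (j : Int)) := by
        intro l; apply List.map_congr_left; intro j _; simp only [Function.comp]; push_cast; ring
      rw [hf]

theorem rev_struct (a : List Int) (h : a ≠ []) :
    a.reverse = a.getLast h :: (a.take (a.length - 1)).reverse := by
  conv_lhs => rw [← List.dropLast_append_getLast h]
  rw [List.reverse_append, List.dropLast_eq_take]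
  rfl

theorem s1_char (h0 : Int) (t : List Int) :
    ((List.range t.length).filter
        (fun j => decide (t.getD j 0 ≤ (h0 :: pvRunMax h0 t).getD j 0))).map
        (fun (j : ℕ) => 1 + (j : Int))
      = ((List.range (h0 :: t).length).filter (pvPL (h0 :: t))).map (fun (i : ℕ) => (i : Int)) := by
  rw [List.length_cons, List.range_succ_eq_map, List.filter_cons]
  have h0f : pvPL (h0 :: t) 0 = false := by simp [pvPL]
  rw [h0f]
  simp only [Bool.false_eq_true, if_false]
  rw [List.filter_map, List.map_map]
  have hB : List.filter (pvPL (h0 :: t) ∘ Nat.succ) (List.range t.length)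
      = List.filter (fun j => decide (t.getD j 0 ≤ (h0 :: pvRunMax h0 t).getD j 0)) (List.range t.length) := by
    apply List.filter_congr; intro j _
    simp [pvPL, pvPref]
  rw [hB]
  apply List.map_congr_left; intro j _
  simp only [Function.comp]; push_cast; ring

theorem reindexR (a : List Int) (j : ℕ) (hj : j < a.length - 1) :
    pvQR a (a.length - 2 - j)
      = decide ((a.take (a.length - 1)).reverse.getD j 0 ≤ (pvPref a.reverse).getD j 0) := by
  have hn : 2 ≤ a.length := by omega
  set n := a.length with hn'
  have hi1 : n - 2 - j + 1 < n := by omega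
  have e1 : decide (n - 2 - j + 1 < n) = true := by simp [hi1]
  have hwlen : (a.take (n - 1)).reverse.length = n - 1 := by
    simp [List.length_take]; omega
  have hplen : (pvPref a.reverse).length = n := by
    rw [length_pvPref]; simp [hn']
  have e2 : a.getD (n - 2 - j) 0 = (a.take (n - 1)).reverse.getD j 0 := by
    rw [List.getD_eq_getElem _ _ (by omega : n - 2 - j < a.length),
        List.getD_eq_getElem _ _ (by omega : j < (a.take (n-1)).reverse.length)]
    rw [List.getElem_reverse]
    rw [List.getElem_take]
    congr 1
    simp [List.length_take]
    omega
  have e3 : ((pvPref a.reverse).reverse).getD (n - 2 - j + 1) 0 = (pvPref a.reverse).getD j 0 := by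
    rw [List.getD_eq_getElem _ _ (by rw [List.length_reverse, hplen]; omega),
        List.getD_eq_getElem _ _ (by omega : j < (pvPref a.reverse).length)]
    rw [List.getElem_reverse]
    congr 1
    rw [hplen]
    omega
  unfold pvQR
  rw [← hn', e1, e2, e3]
  simp


theorem s2_char (a : List Int) (hne : a ≠ []) :
    (((List.range a.length).filter (pvQR a)).reverse).map (fun (i : ℕ) => (i : Int))
    = ((List.range (a.length - 1)).filter
        (fun j => decide ((a.take (a.length - 1)).reverse.getD j 0 ≤ (pvPref a.reverse).getD j 0))).map
        (fun (j : ℕ) => ((a.length - 1 : ℕ) : Int) - 1 - (j : Int)) := by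
  have hn1 : 1 ≤ a.length := List.length_pos_iff.mpr hne
  set n := a.length with hn
  have hr : List.range n = List.range (n-1) ++ [n-1] := by
    rw [← List.range_succ]
    congr 1
    omega
  rw [hr, List.filter_append]
  have hlastF : List.filter (pvQR a) [n-1] = [] := by
    simp [pvQR, ← hn, Nat.sub_add_cancel hn1]
  rw [hlastF, List.append_nil]
  rw [← List.filter_reverse]
  rw [List.range_eq_range', List.reverse_range']
  rw [List.filter_map, List.map_map]
  have hB : List.filter (pvQR a ∘ fun x => 0 + (n-1) - 1 - x) (List.range (n-1))
      = List.filter (fun j => decide ((a.take (n-1)).reverse.getD j 0 ≤ (pvPref a.reverse).getD j 0)) (List.range (n-1)) := by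
    apply List.filter_congr; intro j hj
    rw [List.mem_range] at hj
    have he : 0 + (n-1) - 1 - j = n - 2 - j := by omega
    simp only [Function.comp, he]
    exact reindexR a j (by omega)
  rw [hB, ← List.range_eq_range']
  apply List.map_congr_left; intro j hj
  rw [List.mem_filter, List.mem_range] at hj
  simp only [Function.comp]
  omega

theorem main_equiv (a : List Int) (hne : a ≠ []) :
    safest_home_from_wind_from_left_right a = safest_home_from_wind_from_left_right_alt a := by
  obtain ⟨h0, t, rfl⟩ : ∃ h0 t, a = h0 :: t := by
    cases a with
    | nil => exact absurd rfl hne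
    | cons h0 t => exact ⟨h0, t, rfl⟩
  have hne' : (h0 :: t) ≠ [] := List.cons_ne_nil h0 t
  simp only [safest_home_from_wind_from_left_right, safest_home_from_wind_from_left_right_alt]
  rw [PySem.List.enumerate_cons, List.foldl_cons]
  simp only [reduceIte]
  rw [show (0:Int) + 1 = 1 from by ring]
  rw [aleft_fold t 1 h0 [] (by norm_num), List.nil_append, s1_char h0 t]
  rw [List.getLast?_eq_some_getLast hne', Option.getD_some]
  rw [show ((h0 :: t).length : Int) - 2 = ((t.length : ℕ) : Int) - 1 from by
    push_cast [List.length_cons]; ring]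
  rw [aright_fold (h0 :: t) t.length (by simp) _ []]
  have hpp : pvPref ((h0 :: t).reverse)
      = (h0 :: t).getLast hne' :: pvRunMax ((h0 :: t).getLast hne') (((h0 :: t).take t.length).reverse) := by
    rw [rev_struct (h0 :: t) hne']
    rfl
  rw [← hpp]
  have hs2 := s2_char (h0 :: t) hne'
  simp only [List.length_cons, Nat.add_sub_cancel] at hs2
  rw [List.nil_append, ← hs2]
  rw [PySem.List.foldl_append_ite_eq_filter
    (fun i => i ∈ List.map (fun (i : ℕ) => (i : Int)) (List.filter (pvPL (h0 :: t)) (List.range (h0 :: t).length)))]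
  rw [List.nil_append]
  simp only [bpref]
  rw [count3 (fun i => decide (1 ≤ i) && decide ((h0 :: t).getD i 0 ≤ (pvPref (h0 :: t)).getD (i - 1) 0))
        (fun i => decide (i + 1 < (h0 :: t).length) && decide ((h0 :: t).getD i 0 ≤ ((pvPref ((h0 :: t).reverse)).reverse).getD (i + 1) 0))
        (List.range (h0 :: t).length) 0 0 0]
  simp only [zero_add, List.length_map, List.length_reverse, List.cons.injEq]
  refine ⟨?_, ?_, ?_, trivial⟩
  · rw [← List.countP_eq_length_filter]; rfl
  · rw [← List.countP_eq_length_filter]; rfl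
  · rw [← List.countP_eq_length_filter, List.countP_map, List.countP_reverse, List.countP_filter]
    congr 1
    rw [List.countP_eq_length_filter, List.countP_eq_length_filter]
    congr 1
    apply List.filter_congr
    intro i hi
    rw [List.mem_range] at hi
    have hmem : ((i : Int) ∈ List.map (fun (j : ℕ) => (j : Int))
        (List.filter (pvPL (h0 :: t)) (List.range (h0 :: t).length))) ↔ pvPL (h0 :: t) i = true := by
      simp only [List.mem_map, List.mem_filter, List.mem_range, Int.natCast_inj]
      constructor
      · rintro ⟨j, ⟨_, hj⟩, rfl⟩; exact hj
      · intro hp; exact ⟨i, ⟨by simpa using hi, hp⟩, rfl⟩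
    have hdm : decide ((i : Int) ∈ List.map (fun (j : ℕ) => (j : Int))
        (List.filter (pvPL (h0 :: t)) (List.range (h0 :: t).length))) = pvPL (h0 :: t) i := by
      by_cases hp : pvPL (h0 :: t) i = true
      · exact (decide_eq_true (hmem.mpr hp)).trans hp.symm
      · have h1 : pvPL (h0 :: t) i = false := Bool.eq_false_iff.mpr hp
        rw [h1]
        exact decide_eq_false (fun hm => hp (hmem.mp hm))
    simp only [Function.comp]
    rw [hdm]
    rfl


-- ===== VERDICT (by name: the statement is the Claim_ definition above) =====
theorem safest_home_from_wind_from_left_right_spec : Claim_equal_safest_home_from_wind_from_left_right := by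
  intro a _ hpre
  exact main_equiv a hpre
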